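-- pv_equiv track=rewrite | github.com/CDLUC3/ezid | code/nog_minter.py | _get_xdig_str
-- ===== SOURCE A (Python) =====
-- XDIG_STR = "0123456789bcdfghjkmnpqrstvwxz"
--
-- ALPHA_COUNT = len(XDIG_STR)
--
-- DIGIT_COUNT = 10
--
-- def _get_xdig_str(comp_counter, mask_str):
--     """Convert compounded counter value to final sping as specified by the mask"""
--     s = []
--
--     for c in reversed(mask_str):
--         if c == "k":
--             continue
--         elif c in ("e", "f"):
--             divider = ALPHA_COUNT
--         elif c == "d":
--             divider = DIGIT_COUNT
--
--         # noinspection PyUnboundLocalVariable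
--         # log.debug((comp_counter, divider))
--         comp_counter, rem = divmod(comp_counter, divider)
--         x_char = XDIG_STR[rem]
--
--         if c == "f" and x_char.isdigit():
--             return ""
--
--         s.append(x_char)
--
--     return "".join(reversed(s))
-- ===== SOURCE B (Python) =====
-- XDIG_STR = "0123456789bcdfghjkmnpqrstvwxz"
--
-- def _get_xdig_str(comp_counter, mask_str):
--     # Mixed-radix decoding: one right-to-left pass records, for each emitting
--     # mask position, (mask char, radix, place weight = product of radices to
--     # its right); then each output character is computed directly from the
--     # untouched counter as (comp_counter // weight) % radix.
--     specs = []
--     weight = 1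
--     radix = None
--     for c in reversed(mask_str):
--         if c == "k":
--             continue
--         if c in ("e", "f"):
--             radix = 29
--         elif c == "d":
--             radix = 10
--         # any other character reuses the previous radix (as the original does)
--         specs.append((c, radix, weight))
--         weight *= radix
--     out = []
--     for c, radix, w in reversed(specs):
--         digit = (comp_counter // w) % radix
--         if c == "f" and digit < 10:
--             return ""
--         out.append(XDIG_STR[digit])
--     return "".join(out)
-- ===== Notes on version B (the rewrite author's own statement) =====
-- stated objective: alternative
-- what changed: Replaces the sequential divmod loop that mutates the counter with mixed-radix decoding: one right-to-left pass precomputes each emitting position's radix and place weight, then every output character is computed independently as (counter // weight) % radix, and the 'f'-digit early exit tests the digit value instead of the character.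
-- outside the precondition, e.g. on _get_xdig_str(5, 'x'): A raises UnboundLocalError, B raises TypeError
import Mathlib
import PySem

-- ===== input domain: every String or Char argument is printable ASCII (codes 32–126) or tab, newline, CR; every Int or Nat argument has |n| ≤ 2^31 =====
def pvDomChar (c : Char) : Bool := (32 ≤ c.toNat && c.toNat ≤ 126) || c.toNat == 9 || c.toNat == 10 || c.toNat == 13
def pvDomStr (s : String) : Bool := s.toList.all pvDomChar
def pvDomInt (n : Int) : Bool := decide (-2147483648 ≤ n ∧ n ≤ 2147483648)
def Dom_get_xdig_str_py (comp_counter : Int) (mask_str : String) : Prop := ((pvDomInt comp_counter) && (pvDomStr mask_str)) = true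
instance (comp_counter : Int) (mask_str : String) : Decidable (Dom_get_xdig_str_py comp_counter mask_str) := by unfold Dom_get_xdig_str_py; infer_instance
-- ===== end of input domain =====

-- B re-implements A as direct mixed-radix decoding (weights precomputed in one pass,
-- each output char computed independently from the untouched counter): alternative
-- decomposition, same cost; return values proved equal on Pre_ (where A does not raise).

-- ===== PORT A =====
def pvXdig : List Char := "0123456789bcdfghjkmnpqrstvwxz".toList

-- the loop of A over the reversed mask; state: current counter, current divider
-- (none = Python's `divider` not yet bound).  Result: the appended chars in append
-- order; `none` models the early `return ""` on an 'f' position yielding a digit.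
def goA (cc : Int) (div : Option Int) : List Char → Option (List Char)
  | [] => some []
  | c :: rest =>
    if c = 'k' then goA cc div rest
    else
      match (if c = 'e' ∨ c = 'f' then some (29 : Int)
             else if c = 'd' then some 10 else div) with
      | none => none
        -- Python raises UnboundLocalError here (divider unbound); excluded by Pre_
      | some dv =>
        let q := PySem.Int.floordiv cc dv
        let rem := PySem.Int.mod cc dv
        let x := PySem.List.pyGetD pvXdig rem ' '   -- rem ∈ [0,dv) < 29, always in range
        if c = 'f' ∧ x.isDigit then none            -- x.isDigit exact: x is an ASCII char of XDIG_STR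
        else
          match goA q (some dv) rest with
          | none => none
          | some s => some (x :: s)

def get_xdig_str_py (comp_counter : Int) (mask_str : String) : String :=
  match goA comp_counter none mask_str.toList.reverse with
  | none => ""
  | some s => String.mk s.reverse

-- ===== PORT B =====
-- pass 1 (right-to-left): for each emitting position, (mask char, radix, weight)
def specB (radix : Option Int) (weight : Int) : List Char → List (Char × Int × Int)
  | [] => []
  | c :: rest =>
    if c = 'k' then specB radix weight rest
    else
      match (if c = 'e' ∨ c = 'f' then some (29 : Int)
             else if c = 'd' then some 10 else radix) with
      | none => []   -- Source B raises a TypeError here (radix is None); excluded by Pre_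
      | some rv => (c, rv, weight) :: specB (some rv) (weight * rv) rest

-- pass 2 (forward over the reversed specs): each char directly from the counter
def outB (cc : Int) : List (Char × Int × Int) → Option (List Char)
  | [] => some []
  | (c, r, w) :: rest =>
    let digit := PySem.Int.mod (PySem.Int.floordiv cc w) r
    if c = 'f' ∧ digit < 10 then none               -- early `return ""`
    else
      match outB cc rest with
      | none => none
      | some l => some (PySem.List.pyGetD pvXdig digit ' ' :: l)

def get_xdig_str_py_alt (comp_counter : Int) (mask_str : String) : String :=
  match outB comp_counter ((specB none 1 mask_str.toList.reverse).reverse) with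
  | none => ""
  | some l => String.mk l

-- ===== PRECONDITION & SPEC =====
-- Pre_ excludes exactly the masks on which A raises UnboundLocalError: those whose
-- last character that is not 'k' is not one of 'e','f','d' (divider never bound).
def Pre_get_xdig_str_py (comp_counter : Int) (mask_str : String) : Prop :=
  ((mask_str.toList.reverse.dropWhile (fun c => c = 'k')).head?.all
    (fun c => c == 'e' || c == 'f' || c == 'd')) = true
instance (comp_counter : Int) (mask_str : String) : Decidable (Pre_get_xdig_str_py comp_counter mask_str) := by unfold Pre_get_xdig_str_py; infer_instance

def pvWitness_get_xdig_str_py : Int × String := (123456, "eedk")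

def Spec_get_xdig_str_py (comp_counter : Int) (mask_str : String) (out : String) : Prop := out = get_xdig_str_py_alt comp_counter mask_str
instance (comp_counter : Int) (mask_str : String) (out : String) : Decidable (Spec_get_xdig_str_py comp_counter mask_str out) := by unfold Spec_get_xdig_str_py; infer_instance

-- ===== CLAIM (what is proved, stated in full; the proofs are below) =====
def Claim_equal_get_xdig_str_py : Prop := ∀ (comp_counter : Int) (mask_str : String), Dom_get_xdig_str_py comp_counter mask_str → Pre_get_xdig_str_py comp_counter mask_str → Spec_get_xdig_str_py comp_counter mask_str (get_xdig_str_py comp_counter mask_str)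

-- ===== LEMMAS AND PROOFS =====

-- characters of XDIG_STR at indices 0..28: digit exactly below index 10
lemma xdig_isDigit (n : Nat) (h : n < 29) :
    ((pvXdig.getD n ' ').isDigit) = decide (n < 10) := by
  revert h; revert n; decide

lemma mod_bounds (cc dv : Int) (hdv : 0 < dv) :
    0 ≤ PySem.Int.mod cc dv ∧ PySem.Int.mod cc dv < dv := by
  rw [PySem.Int.mod_eq_emod_of_pos hdv]
  exact ⟨Int.emod_nonneg _ (by omega), Int.emod_lt_of_pos _ hdv⟩

-- right-to-left analogue of outB (same element-wise computations)
def outR (cc : Int) : List (Char × Int × Int) → Option (List Char)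
  | [] => some []
  | (c, r, w) :: rest =>
    let digit := PySem.Int.mod (PySem.Int.floordiv cc w) r
    if c = 'f' ∧ digit < 10 then none
    else
      match outR cc rest with
      | none => none
      | some l => some (PySem.List.pyGetD pvXdig digit ' ' :: l)

def badB (cc : Int) (sp : Char × Int × Int) : Bool :=
  sp.1 = 'f' ∧ PySem.Int.mod (PySem.Int.floordiv cc sp.2.2) sp.2.1 < 10

def chrB (cc : Int) (sp : Char × Int × Int) : Char :=
  PySem.List.pyGetD pvXdig (PySem.Int.mod (PySem.Int.floordiv cc sp.2.2) sp.2.1) ' '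

lemma outB_eq (cc : Int) (l : List (Char × Int × Int)) :
    outB cc l = if l.any (badB cc) then none else some (l.map (chrB cc)) := by
  induction l with
  | nil => simp [outB]
  | cons sp rest ih =>
    obtain ⟨c, r, w⟩ := sp
    by_cases hb : c = 'f' ∧ PySem.Int.mod (PySem.Int.floordiv cc w) r < 10
    · simp [outB, badB, hb]
    · by_cases ha : rest.any (badB cc) = true
      · simp [outB, ih, badB, chrB, hb, ha]
      · simp [outB, ih, badB, chrB, hb, ha]

lemma outR_eq (cc : Int) (l : List (Char × Int × Int)) :
    outR cc l = if l.any (badB cc) then none else some (l.map (chrB cc)) := by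
  induction l with
  | nil => simp [outR]
  | cons sp rest ih =>
    obtain ⟨c, r, w⟩ := sp
    by_cases hb : c = 'f' ∧ PySem.Int.mod (PySem.Int.floordiv cc w) r < 10
    · simp [outR, badB, hb]
    · by_cases ha : rest.any (badB cc) = true
      · simp [outR, ih, badB, chrB, hb, ha]
      · simp [outR, ih, badB, chrB, hb, ha]

lemma floordiv_floordiv (cc a b : Int) (ha : 0 < a) (hb : 0 < b) :
    PySem.Int.floordiv (PySem.Int.floordiv cc a) b = PySem.Int.floordiv cc (a * b) := by
  rw [PySem.Int.floordiv_eq_ediv_of_pos ha, PySem.Int.floordiv_eq_ediv_of_pos hb,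
      PySem.Int.floordiv_eq_ediv_of_pos (by positivity)]
  exact Int.ediv_ediv_of_nonneg (by omega)

-- Bool form of the Pre_ condition, on the reversed char list
def preok (rcs : List Char) : Bool :=
  (rcs.dropWhile (fun c => c = 'k')).head?.all (fun c => c == 'e' || c == 'f' || c == 'd')

-- main invariant: A's loop with counter cc // w and current divider d computes
-- the right-to-left evaluation of B's spec list built with radix d and weight w
lemma goA_eq_outR (rcs : List Char) : ∀ (cc w : Int) (d : Option Int),
    0 < w → (d = none ∨ d = some 10 ∨ d = some 29) →
    (d = none → preok rcs = true) →
    goA (PySem.Int.floordiv cc w) d rcs = outR cc (specB d w rcs) := by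
  induction rcs with
  | nil => intro cc w d hw hd hpre; simp [goA, specB, outR]
  | cons c rest ih =>
    intro cc w d hw hd hpre
    by_cases hk : c = 'k'
    · simp only [goA, specB, if_pos hk]
      exact ih cc w d hw hd (fun h => by
        have := hpre h; simpa [preok, List.dropWhile, hk] using this)
    · rcases hcase : (if c = 'e' ∨ c = 'f' then some (29 : Int)
                      else if c = 'd' then some 10 else d) with _ | dv
      · -- divider never bound: A raises here; this case is excluded by preok
        have hne : ¬ (c = 'e' ∨ c = 'f') := by intro h; simp [h] at hcase
        have hnd : c ≠ 'd' := by
          intro h; rw [if_neg hne, if_pos h] at hcase; simp at hcase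
        have hdn : d = none := by rw [if_neg hne, if_neg hnd] at hcase; exact hcase
        exfalso
        have := hpre hdn
        simp only [preok] at this
        rw [List.dropWhile_cons_of_neg (by simpa using hk)] at this
        simp only [List.head?_cons, Option.all_some] at this
        push_neg at hne
        simp [hne.1, hne.2, hnd] at this
      · have hdv : dv = 10 ∨ dv = 29 := by
          split_ifs at hcase with h1 h2
          · exact Or.inr (by injection hcase with h; omega)
          · exact Or.inl (by injection hcase with h; omega)
          · rcases hd with h | h | h <;> rw [h] at hcase <;> simp at hcase <;> omega
        have hdvpos : (0 : Int) < dv := by omega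
        simp only [goA, specB, if_neg hk, hcase]
        have hbounds := mod_bounds (PySem.Int.floordiv cc w) dv hdvpos
        set rem := PySem.Int.mod (PySem.Int.floordiv cc w) dv with hremdef
        have hget : PySem.List.pyGetD pvXdig rem ' ' = pvXdig.getD rem.toNat ' ' := by
          have h0 : rem = ((rem.toNat : Nat) : Int) := by omega
          conv_lhs => rw [h0]
          rw [PySem.List.pyGetD_natCast]
        have hdig : (PySem.List.pyGetD pvXdig rem ' ').isDigit = decide (rem < 10) := by
          rw [hget, xdig_isDigit rem.toNat (by omega)]
          simp only [decide_eq_decide]; omega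
        have hnext : PySem.Int.floordiv (PySem.Int.floordiv cc w) dv
            = PySem.Int.floordiv cc (w * dv) :=
          floordiv_floordiv cc w dv hw hdvpos
        have hih := ih cc (w * dv) (some dv) (by positivity)
          (by rcases hdv with h | h <;> simp [h]) (by simp)
        simp only [outR]
        rw [hnext, hih]
        by_cases hf : c = 'f' ∧ rem < 10
        · rw [if_pos ⟨hf.1, by rw [hdig]; simpa using hf.2⟩, if_pos hf]
        · rw [if_neg (fun hcon => hf ⟨hcon.1, by have h2 := hcon.2; rw [hdig] at h2; simpa using h2⟩),
              if_neg hf]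

-- ===== VERDICT (by name: the statement is the Claim_ definition above) =====
theorem get_xdig_str_py_spec : Claim_equal_get_xdig_str_py := by
  intro cc mask _hdom hpre
  unfold Spec_get_xdig_str_py get_xdig_str_py get_xdig_str_py_alt
  have h1 : PySem.Int.floordiv cc 1 = cc := by
    rw [PySem.Int.floordiv_eq_ediv_of_pos (by omega)]; exact Int.ediv_one cc
  have hmain := goA_eq_outR mask.toList.reverse cc 1 none (by omega)
    (Or.inl rfl) (fun _ => hpre)
  rw [h1] at hmain
  rw [hmain, outR_eq, outB_eq]
  by_cases hb : (specB none 1 mask.toList.reverse).any (badB cc) = true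
  · rw [List.any_reverse, if_pos hb, if_pos hb]
  · rw [List.any_reverse, if_neg hb, if_neg hb]
    simp [List.map_reverse]
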